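-- pv_equiv track=rewrite | github.com/swfiua/blume | blume/noligo.py | longrun
-- ===== SOURCE A (Python) =====
-- def longrun(hits):
--     run = 0
--     best = 0
--     for hit in hits:
--         if not hit:
--             run += 1
--         else:
--             best = max(best, run)
--             run = 0
--
--     best= max(best, run)
--
--     return best
-- ===== SOURCE B (Python) =====
-- def longrun(hits):
--     n = len(hits)
--     best = 0
--     i = 0
--     while i < n:
--         j = i
--         while j < n and not hits[j]:
--             j += 1
--         best = max(best, j - i)
--         i = j + 1
--     return best
-- ===== Notes on version B (the rewrite author's own statement) =====
-- stated objective: alternative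
-- what changed: Replaces the per-element running-counter-with-flush by a two-pointer chunk scan: an outer loop jumps from run to run, an inner scan finds each falsy run's end, and the maximum of run lengths (j - i) is taken per chunk.
import Mathlib
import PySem

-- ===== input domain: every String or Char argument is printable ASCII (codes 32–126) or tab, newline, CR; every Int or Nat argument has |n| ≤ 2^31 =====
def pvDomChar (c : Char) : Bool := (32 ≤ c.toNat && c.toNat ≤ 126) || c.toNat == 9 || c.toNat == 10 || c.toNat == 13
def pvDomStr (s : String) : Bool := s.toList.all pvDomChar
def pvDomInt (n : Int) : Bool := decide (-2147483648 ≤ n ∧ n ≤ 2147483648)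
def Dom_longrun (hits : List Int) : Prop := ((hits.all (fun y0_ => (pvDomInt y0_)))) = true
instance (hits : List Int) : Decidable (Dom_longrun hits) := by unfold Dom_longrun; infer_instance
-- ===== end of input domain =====

-- B changes the decomposition (two-pointer chunk scan instead of a running counter with flush); equal return value proved on all inputs.

-- ===== PORT A =====
-- A: one pass, state (run, best); falsy (= 0) increments run, truthy flushes run into best; final flush.
def longrun (hits : List Int) : Int :=
  let p := hits.foldl
    (fun (s : Int × Int) hit => if hit == 0 then (s.1 + 1, s.2) else ((0 : Int), max s.2 s.1))
    ((0 : Int), (0 : Int))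
  max p.2 p.1

-- ===== PORT B =====
-- B helper: the inner while loop `while j < n and not hits[j]: j += 1`.
def scanRun (hits : List Int) (j : Nat) : Nat :=
  if h : j < hits.length then
    if hits[j]'h == 0 then scanRun hits (j + 1) else j
  else j
termination_by hits.length - j

-- needed by goB's termination proof
theorem scanRun_ge (hits : List Int) (i : Nat) : i ≤ scanRun hits i := by
  fun_induction scanRun hits i with
  | case1 j h h0 ih => omega
  | case2 j h h0 => omega
  | case3 j h => omega

-- B helper: the outer while loop over i, accumulating best.
def goB (hits : List Int) (i : Nat) (best : Int) : Int :=
  if h : i < hits.length then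
    let j := scanRun hits i
    goB hits (j + 1) (max best ((j : Int) - (i : Int)))
  else best
termination_by hits.length - i
decreasing_by
  have hj : i ≤ scanRun hits i := scanRun_ge hits i
  omega

def longrun_alt (hits : List Int) : Int := goB hits 0 0

-- ===== PRECONDITION & SPEC =====
def Spec_longrun (hits : List Int) (out : Int) : Prop := out = longrun_alt hits
instance (hits : List Int) (out : Int) : Decidable (Spec_longrun hits out) := by unfold Spec_longrun; infer_instance

-- ===== CLAIM (what is proved, stated in full; the proofs are below) =====
def Claim_equal_longrun : Prop := ∀ (hits : List Int), Dom_longrun hits → Spec_longrun hits (longrun hits)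

-- ===== LEMMAS AND PROOFS =====

def stepA (s : Int × Int) (hit : Int) : Int × Int :=
  if hit == 0 then (s.1 + 1, s.2) else ((0 : Int), max s.2 s.1)

theorem scanRun_le (hits : List Int) (i : Nat) (hi : i ≤ hits.length) :
    scanRun hits i ≤ hits.length := by
  fun_induction scanRun hits i with
  | case1 j h h0 ih => exact ih (by omega)
  | case2 j h h0 => omega
  | case3 j h => omega

theorem scanRun_stop (hits : List Int) (i : Nat)
    (h : scanRun hits i < hits.length) : hits[scanRun hits i]'h ≠ 0 := by
  fun_induction scanRun hits i with
  | case1 j hj h0 ih => exact ih h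
  | case2 j hj h0 => simpa using h0
  | case3 j hj => omega

theorem scanRun_zeros (hits : List Int) (i : Nat) :
    hits.drop i = List.replicate (scanRun hits i - i) 0 ++ hits.drop (scanRun hits i) := by
  fun_induction scanRun hits i with
  | case1 j hj h0 ih =>
    have hge : j + 1 ≤ scanRun hits (j + 1) := scanRun_ge hits (j + 1)
    have hd : hits.drop j = hits[j]'hj :: hits.drop (j + 1) := List.drop_eq_getElem_cons hj
    rw [hd, ih]
    have : scanRun hits (j + 1) - j = (scanRun hits (j + 1) - (j + 1)) + 1 := by omega
    rw [this, List.replicate_succ]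
    simp at h0
    simp [h0]
  | case2 j hj h0 => simp
  | case3 j hj => simp

theorem foldl_replicate_zero (k : Nat) (rest : List Int) (run best : Int) :
    List.foldl stepA (run, best) (List.replicate k 0 ++ rest)
      = List.foldl stepA (run + (k : Int), best) rest := by
  induction k generalizing run with
  | zero => simp
  | succ m ih =>
    rw [List.replicate_succ, List.cons_append, List.foldl_cons]
    have h1 : stepA (run, best) 0 = (run + 1, best) := by simp [stepA]
    rw [h1, ih]
    have h2 : run + 1 + (m : Int) = run + ((m + 1 : Nat) : Int) := by push_cast; ring
    rw [h2]

theorem goB_fold (hits : List Int) (i : Nat) (best : Int) (hb : 0 ≤ best) :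
    goB hits i best
      = (let p := List.foldl stepA ((0 : Int), best) (hits.drop i); max p.2 p.1) := by
  fun_induction goB hits i best with
  | case1 i best h j ih =>
    have hjge : i ≤ j := scanRun_ge hits i
    have hjle : j ≤ hits.length := scanRun_le hits i (by omega)
    have hz : hits.drop i = List.replicate (j - i) 0 ++ hits.drop j := scanRun_zeros hits i
    have hcast : ((j - i : Nat) : Int) = (j : Int) - (i : Int) := by omega
    by_cases hjl : j < hits.length
    · have hstop : hits[j]'hjl ≠ 0 := scanRun_stop hits i hjl
      have hdj : hits.drop j = hits[j]'hjl :: hits.drop (j + 1) := List.drop_eq_getElem_cons hjl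
      rw [ih (le_max_of_le_left ‹0 ≤ best›), hz, hdj, foldl_replicate_zero]
      simp only [List.foldl_cons, stepA, beq_iff_eq, if_neg hstop]
      norm_num [hcast]
    · have hje : j = hits.length := by omega
      rw [ih (le_max_of_le_left ‹0 ≤ best›), hz, foldl_replicate_zero]
      have hd1 : hits.drop j = [] := by simp [hje]
      have hd2 : hits.drop (j + 1) = [] := by simp; omega
      rw [hd1, hd2]
      simp only [List.foldl_nil]
      simp [hcast]
      omega
  | case2 i best h =>
    have hd : hits.drop i = [] := by simp; omega
    simp [hd]
    omega

-- ===== VERDICT (by name: the statement is the Claim_ definition above) =====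
theorem longrun_spec : Claim_equal_longrun := by
  intro hits _
  unfold Spec_longrun longrun longrun_alt
  rw [goB_fold hits 0 0 (by omega)]
  rfl
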